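-- pv_equiv track=rewrite | github.com/Ashwin-Kalyan/CSCI-1913 | Project01/wordle.py | no_letters
-- ===== SOURCE A (Python) =====
-- def no_letters(clues):
--     """
--     Creates a string of letters guessed by the player that are not in the secret word.
--
--     Args:
--         clues (list): A list of tuples, with each tuple being a guess (string) and the clues returned.
--     Return:
--         str: A string containing which guessed letters are not in the secret word.
--     """
--     no_letters_set = set()  # Use a set to avoid duplicates
--     yes_letters_set = set()  # Track letters that are confirmed to be in the word
--
--     for guess, clue in clues:  # Iterate over each (guess, clue) pair
--         for i in range(len(clue)):  # Iterate over each position in the clue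
--             if clue[i] == 'grey':
--                 # Only add the letter if it's not in the yes_letters_set
--                 if guess[i] not in yes_letters_set:
--                     no_letters_set.add(guess[i])
--             elif clue[i] == 'green' or clue[i] == 'yellow':
--                 # If the letter is green or yellow, it's in the word
--                 yes_letters_set.add(guess[i])
--
--     # Remove any letters from no_letters_set that are in yes_letters_set
--     no_letters_set -= yes_letters_set
--
--     # Sort alphabetically, convert the set to a sorted list, then to a string, then uppercase all letters
--     no_letters_list = sorted(no_letters_set)
--     return ''.join(no_letters_list).upper()
-- ===== SOURCE B (Python) =====
-- def no_letters(clues):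
--     # Sort-then-scan: flatten the clues into (letter, color) events, sort them by
--     # letter, then sweep once over the sorted stream, emitting each letter group
--     # that saw 'grey' but never 'green'/'yellow'.  The sort does double duty: the
--     # output comes out already alphabetical, so no sets and no final sort of them.
--     events = sorted(((guess[i], clue[i])
--                      for guess, clue in clues
--                      for i in range(len(clue))
--                      if clue[i] in ('grey', 'green', 'yellow')),
--                     key=lambda e: e[0])
--     out = []
--     prev = None
--     grey = False
--     good = False
--     for ch, col in events:
--         if prev != ch:
--             if prev is not None and grey and not good:
--                 out.append(prev)
--             prev = ch
--             grey = False
--             good = False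
--         if col == 'grey':
--             grey = True
--         else:
--             good = True
--     if prev is not None and grey and not good:
--         out.append(prev)
--     return ''.join(out).upper()
-- ===== Notes on version B (the rewrite author's own statement) =====
-- stated objective: alternative
-- what changed: B replaces A's set bookkeeping entirely by a sort-then-scan: it flattens the clues into (letter, color) events, sorts them by letter, and sweeps the sorted stream once, emitting each contiguous letter group that contains 'grey' but no 'green'/'yellow' -- the sort both groups the letters and produces the alphabetical output order, so no sets and no final sort are needed.
import Mathlib
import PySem

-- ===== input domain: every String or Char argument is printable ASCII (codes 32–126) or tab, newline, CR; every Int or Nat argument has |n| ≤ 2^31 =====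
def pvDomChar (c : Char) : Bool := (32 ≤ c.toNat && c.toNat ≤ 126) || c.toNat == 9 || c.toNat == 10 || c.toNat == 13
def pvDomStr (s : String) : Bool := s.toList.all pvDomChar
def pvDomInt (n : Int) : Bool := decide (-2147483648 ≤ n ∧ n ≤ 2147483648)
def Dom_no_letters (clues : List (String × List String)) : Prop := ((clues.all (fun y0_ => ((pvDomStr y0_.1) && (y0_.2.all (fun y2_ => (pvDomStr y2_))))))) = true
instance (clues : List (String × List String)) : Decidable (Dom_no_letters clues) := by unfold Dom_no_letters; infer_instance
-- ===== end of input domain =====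

-- B replaces A's set bookkeeping by a sort-then-scan over (letter, color) events:
-- the sort groups letters and yields the alphabetical output order in one go.

-- ===== PORT A =====
def no_letters (clues : List (String × List String)) : String :=
  let st := clues.foldl
    (fun (s : PySem.Set Char × PySem.Set Char) gc =>
      (PySem.List.pyRange 0 (gc.2.length : Int) 1).foldl
        (fun (s : PySem.Set Char × PySem.Set Char) i =>
          if PySem.List.pyGetD gc.2 i "" = "grey" then
            -- Python: if guess[i] not in yes_letters_set: no_letters_set.add(guess[i])
            (if PySem.Set.contains s.2 (PySem.List.pyGetD gc.1.toList i ' ') then s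
             else (PySem.Set.add s.1 (PySem.List.pyGetD gc.1.toList i ' '), s.2))
          else if PySem.List.pyGetD gc.2 i "" = "green" ∨ PySem.List.pyGetD gc.2 i "" = "yellow" then
            (s.1, PySem.Set.add s.2 (PySem.List.pyGetD gc.1.toList i ' '))
          else s)
        s)
    (PySem.Set.empty, PySem.Set.empty)
  PySem.Str.upper (String.ofList (PySem.List.sorted (PySem.Set.diff st.1 st.2) (fun x => x) false))

-- ===== PORT B =====
-- State of B's sweep: (out, prev, grey, good) exactly as in Source B's loop.
def nlbStep (st : List Char × Option Char × Bool × Bool) (e : Char × String) :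
    List Char × Option Char × Bool × Bool :=
  let st1 : List Char × Option Char × Bool × Bool :=
    if st.2.1 ≠ some e.1 then
      ((match st.2.1 with
        | some p => if st.2.2.1 && !st.2.2.2 then st.1 ++ [p] else st.1
        | none => st.1), some e.1, false, false)
    else st
  if e.2 = "grey" then (st1.1, st1.2.1, true, st1.2.2.2)
  else (st1.1, st1.2.1, st1.2.2.1, true)

-- the trailing 'if prev is not None and grey and not good: out.append(prev)'
def nlbFlush (st : List Char × Option Char × Bool × Bool) : List Char :=
  match st.2.1 with
  | some p => if st.2.2.1 && !st.2.2.2 then st.1 ++ [p] else st.1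
  | none => st.1

def no_letters_alt (clues : List (String × List String)) : String :=
  let events := PySem.List.sorted
    (clues.flatMap (fun gc =>
      ((PySem.List.pyRange 0 (gc.2.length : Int) 1).filter (fun i =>
          decide (PySem.List.pyGetD gc.2 i "" = "grey" ∨ PySem.List.pyGetD gc.2 i "" = "green" ∨
                  PySem.List.pyGetD gc.2 i "" = "yellow"))).map
        (fun i => (PySem.List.pyGetD gc.1.toList i ' ', PySem.List.pyGetD gc.2 i ""))))
    (fun e => e.1) false
  let st := events.foldl nlbStep ([], none, false, false)
  PySem.Str.upper (String.ofList (nlbFlush st))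

-- ===== PRECONDITION & SPEC =====
-- Pre_ excludes exactly the inputs where the Python A raises IndexError: a clue position whose
-- color is 'grey'/'green'/'yellow' while the guess string is shorter than that position.
def Pre_no_letters (clues : List (String × List String)) : Prop :=
  ∀ p ∈ clues, ∀ i ∈ List.range p.2.length,
    (p.2.getD i "" = "grey" ∨ p.2.getD i "" = "green" ∨ p.2.getD i "" = "yellow") →
      i < p.1.toList.length
instance (clues : List (String × List String)) : Decidable (Pre_no_letters clues) := by
  unfold Pre_no_letters; infer_instance
def pvWitness_no_letters : (List (String × List String)) :=
  [("abc", ["grey", "green", "grey"]), ("bd", ["yellow", "grey"])]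
def Spec_no_letters (clues : List (String × List String)) (out : String) : Prop := out = no_letters_alt clues
instance (clues : List (String × List String)) (out : String) : Decidable (Spec_no_letters clues out) := by unfold Spec_no_letters; infer_instance

-- ===== CLAIM (what is proved, stated in full; the proofs are below) =====
def Claim_equal_no_letters : Prop := ∀ (clues : List (String × List String)), Dom_no_letters clues → Pre_no_letters clues → Spec_no_letters clues (no_letters clues)

-- ===== LEMMAS AND PROOFS =====

-- The stream of (color, letter) pairs A processes, in order.
def nlEv (p : String × List String) : List (String × Char) :=
  (List.range p.2.length).map (fun i => (p.2.getD i "", p.1.toList.getD i ' '))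

-- One step of A's interleaved two-set loop, per (color, letter) event.
def nlStepA (s : PySem.Set Char × PySem.Set Char) (e : String × Char) :
    PySem.Set Char × PySem.Set Char :=
  if e.1 = "grey" then
    (if PySem.Set.contains s.2 e.2 then s else (PySem.Set.add s.1 e.2, s.2))
  else if e.1 = "green" ∨ e.1 = "yellow" then (s.1, PySem.Set.add s.2 e.2)
  else s

-- "x received a green/yellow clue" resp. "x received a grey clue" in A's stream.
def nlGood (x : Char) (es : List (String × Char)) : Prop :=
  ∃ e ∈ es, (e.1 = "green" ∨ e.1 = "yellow") ∧ e.2 = x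
def nlGrey (x : Char) (es : List (String × Char)) : Prop := ("grey", x) ∈ es

theorem nlFoldA (clues : List (String × List String)) (s : PySem.Set Char × PySem.Set Char) :
    clues.foldl
      (fun (s : PySem.Set Char × PySem.Set Char) gc =>
        (PySem.List.pyRange 0 (gc.2.length : Int) 1).foldl
          (fun (s : PySem.Set Char × PySem.Set Char) i =>
            if PySem.List.pyGetD gc.2 i "" = "grey" then
              (if PySem.Set.contains s.2 (PySem.List.pyGetD gc.1.toList i ' ') then s
               else (PySem.Set.add s.1 (PySem.List.pyGetD gc.1.toList i ' '), s.2))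
            else if PySem.List.pyGetD gc.2 i "" = "green" ∨ PySem.List.pyGetD gc.2 i "" = "yellow" then
              (s.1, PySem.Set.add s.2 (PySem.List.pyGetD gc.1.toList i ' '))
            else s)
          s)
      s
    = (clues.flatMap nlEv).foldl nlStepA s := by
  rw [List.foldl_flatMap]
  apply PySem.List.foldl_congr_mem
  intro acc gc _
  simp only [nlEv, PySem.List.pyRange_zero_nat, List.foldl_map, PySem.List.pyGetD_natCast, nlStepA]

-- A's two sets after the loop, characterised by the event stream.
theorem nlAInv (es : List (String × Char)) :
    (es.foldl nlStepA (PySem.Set.empty, PySem.Set.empty)).1.Nodup ∧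
    (es.foldl nlStepA (PySem.Set.empty, PySem.Set.empty)).2.Nodup ∧
    ∀ x : Char,
      (x ∈ (es.foldl nlStepA (PySem.Set.empty, PySem.Set.empty)).2 ↔ nlGood x es) ∧
      ((x ∈ (es.foldl nlStepA (PySem.Set.empty, PySem.Set.empty)).1 ∧
        x ∉ (es.foldl nlStepA (PySem.Set.empty, PySem.Set.empty)).2) ↔
          (nlGrey x es ∧ ¬ nlGood x es)) := by
  induction es using List.reverseRecOn with
  | nil =>
    refine ⟨List.nodup_nil, List.nodup_nil, fun x => ?_⟩
    simp [nlGood, nlGrey, PySem.Set.empty]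
  | append_singleton es e ih =>
    obtain ⟨hn1, hn2, hinv⟩ := ih
    rw [List.foldl_append] at *
    set s := es.foldl nlStepA (PySem.Set.empty, PySem.Set.empty) with hs
    obtain ⟨c, x0⟩ := e
    have hGood : ∀ x, nlGood x (es ++ [(c, x0)]) ↔
        (nlGood x es ∨ ((c = "green" ∨ c = "yellow") ∧ x = x0)) := by
      intro x
      unfold nlGood
      simp only [List.mem_append, List.mem_singleton]
      constructor
      · rintro ⟨e, (he | rfl), hcl, hx⟩
        · exact Or.inl ⟨e, he, hcl, hx⟩
        · exact Or.inr ⟨hcl, hx.symm⟩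
      · rintro (⟨e, he, hcl, hx⟩ | ⟨hcl, hx⟩)
        · exact ⟨e, Or.inl he, hcl, hx⟩
        · exact ⟨(c, x0), Or.inr rfl, hcl, hx.symm⟩
    have hGrey : ∀ x, nlGrey x (es ++ [(c, x0)]) ↔ (nlGrey x es ∨ (c = "grey" ∧ x = x0)) := by
      intro x
      unfold nlGrey
      simp only [List.mem_append, List.mem_singleton, Prod.ext_iff]
      constructor
      · rintro (h | ⟨h1, h2⟩)
        · exact Or.inl h
        · exact Or.inr ⟨h1.symm, h2⟩
      · rintro (h | ⟨h1, h2⟩)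
        · exact Or.inl h
        · exact Or.inr ⟨h1.symm, h2⟩
    simp only [List.foldl_cons, List.foldl_nil, nlStepA]
    by_cases hg : c = "grey"
    · subst hg
      rw [if_pos rfl]
      by_cases hc : PySem.Set.contains s.2 x0 = true
      · rw [if_pos hc]
        have hx0good : nlGood x0 es := ((hinv x0).1).1 ((PySem.Set.contains_iff s.2 x0).1 hc)
        refine ⟨hn1, hn2, fun x => ?_⟩
        rw [hGood x, hGrey x]
        have h1 := (hinv x).1
        have h2 := (hinv x).2
        simp only [String.reduceEq, or_false, false_and, or_false]
        constructor
        · exact h1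
        · rw [h2]
          by_cases hxx : x = x0
          · subst hxx; tauto
          · tauto
      · rw [if_neg hc]
        have hx02 : x0 ∉ s.2 := fun hm => hc ((PySem.Set.contains_iff s.2 x0).2 hm)
        have hx0good : ¬ nlGood x0 es := fun h => hx02 (((hinv x0).1).2 h)
        refine ⟨PySem.Set.nodup_add _ _ hn1, hn2, fun x => ?_⟩
        rw [hGood x, hGrey x]
        have h1 := (hinv x).1
        have h2 := (hinv x).2
        simp only [String.reduceEq, or_false, false_and, or_false,
          PySem.Set.mem_add]
        by_cases hxx : x = x0
        · subst hxx; constructor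
          · exact h1
          · tauto
        · constructor
          · exact h1
          · tauto
    · rw [if_neg hg]
      by_cases hgy : c = "green" ∨ c = "yellow"
      · rw [if_pos hgy]
        refine ⟨hn1, PySem.Set.nodup_add _ _ hn2, fun x => ?_⟩
        rw [hGood x, hGrey x]
        have h1 := (hinv x).1
        have h2 := (hinv x).2
        simp only [PySem.Set.mem_add]
        by_cases hxx : x = x0
        · subst hxx; constructor
          · tauto
          · tauto
        · constructor
          · tauto
          · tauto
      · rw [if_neg hgy]
        refine ⟨hn1, hn2, fun x => ?_⟩
        rw [hGood x, hGrey x]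
        have h1 := (hinv x).1
        have h2 := (hinv x).2
        constructor
        · tauto
        · tauto

-- ===== B-side: the sweep over the sorted events =====

-- What the sweep appends after state (prev = p, grey = g, good = go) on the rest of the stream.
def nlAns (p : Char) (g go : Bool) : List (Char × String) → List Char
  | [] => if g && !go then [p] else []
  | e :: t =>
    if p = e.1 then nlAns p (g || decide (e.2 = "grey")) (go || !decide (e.2 = "grey")) t
    else (if g && !go then [p] else []) ++ nlAns e.1 (decide (e.2 = "grey")) (!decide (e.2 = "grey")) t

def nlAns0 : List (Char × String) → List Char
  | [] => []
  | e :: t => nlAns e.1 (decide (e.2 = "grey")) (!decide (e.2 = "grey")) t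

-- "x received grey" / "x received non-grey" in B's (letter, color) events.
def nlGreyB (x : Char) (l : List (Char × String)) : Prop := (x, "grey") ∈ l
def nlGoodB (x : Char) (l : List (Char × String)) : Prop := ∃ c, (x, c) ∈ l ∧ c ≠ "grey"

theorem nlFoldB (es : List (Char × String)) (out : List Char) (p : Char) (g go : Bool) :
    nlbFlush (es.foldl nlbStep (out, some p, g, go)) = out ++ nlAns p g go es := by
  induction es generalizing out p g go with
  | nil =>
    simp only [List.foldl_nil, nlbFlush, nlAns]
    split_ifs <;> simp
  | cons e t ih =>
    simp only [List.foldl_cons, nlAns]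
    by_cases hpe : p = e.1
    · rw [if_pos hpe]
      have hstep : nlbStep (out, some p, g, go) e =
          (out, some p, g || decide (e.2 = "grey"), go || !decide (e.2 = "grey")) := by
        by_cases hc : e.2 = "grey" <;> simp [nlbStep, hpe, hc]
      rw [hstep, ih]
    · rw [if_neg hpe]
      have hstep : nlbStep (out, some p, g, go) e =
          ((if g && !go then out ++ [p] else out), some e.1,
            decide (e.2 = "grey"), !decide (e.2 = "grey")) := by
        by_cases hc : e.2 = "grey" <;> simp [nlbStep, hpe, hc]
      rw [hstep, ih]
      split_ifs <;> simp

theorem nlFoldB0 (es : List (Char × String)) :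
    nlbFlush (es.foldl nlbStep ([], none, false, false)) = nlAns0 es := by
  cases es with
  | nil => rfl
  | cons e t =>
    simp only [List.foldl_cons, nlAns0]
    have hstep : nlbStep (([] : List Char), (none : Option Char), false, false) e =
        ([], some e.1, decide (e.2 = "grey"), !decide (e.2 = "grey")) := by
      by_cases hc : e.2 = "grey" <;> simp [nlbStep, hc]
    rw [hstep, nlFoldB]
    simp

theorem nlGreyB_cons (e : Char × String) (t : List (Char × String)) (x : Char) :
    nlGreyB x (e :: t) ↔ ((e.1 = x ∧ e.2 = "grey") ∨ nlGreyB x t) := by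
  unfold nlGreyB
  rw [List.mem_cons]
  constructor
  · rintro (h | h)
    · exact Or.inl ⟨(congrArg Prod.fst h).symm, (congrArg Prod.snd h).symm⟩
    · exact Or.inr h
  · rintro (⟨h1, h2⟩ | h)
    · exact Or.inl (Prod.ext h1.symm h2.symm)
    · exact Or.inr h

theorem nlGoodB_cons (e : Char × String) (t : List (Char × String)) (x : Char) :
    nlGoodB x (e :: t) ↔ ((e.1 = x ∧ e.2 ≠ "grey") ∨ nlGoodB x t) := by
  unfold nlGoodB
  constructor
  · rintro ⟨c, hc, hne⟩
    rw [List.mem_cons] at hc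
    rcases hc with rfl | h
    · exact Or.inl ⟨rfl, hne⟩
    · exact Or.inr ⟨c, h, hne⟩
  · rintro (⟨h1, h2⟩ | ⟨c, hc, hne⟩)
    · exact ⟨e.2, List.mem_cons.mpr (Or.inl (Prod.ext h1.symm rfl)), h2⟩
    · exact ⟨c, List.mem_cons_of_mem _ hc, hne⟩

theorem nlAns_le (es : List (Char × String)) :
    ∀ (p : Char) (g go : Bool), es.Pairwise (fun a b => a.1 ≤ b.1) → (∀ e ∈ es, p ≤ e.1) →
      ∀ y ∈ nlAns p g go es, p ≤ y := by
  induction es with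
  | nil =>
    intro p g go _ _ y hy
    simp only [nlAns] at hy
    by_cases h : (g && !go) = true
    · rw [if_pos h, List.mem_singleton] at hy; exact hy ▸ le_rfl
    · rw [if_neg h] at hy; simp at hy
  | cons e t ih =>
    intro p g go hs hp y hy
    rw [List.pairwise_cons] at hs
    obtain ⟨hhead, hs'⟩ := hs
    have hp1 : p ≤ e.1 := hp e List.mem_cons_self
    have hpt : ∀ e' ∈ t, p ≤ e'.1 := fun e' he' => hp e' (List.mem_cons_of_mem _ he')
    simp only [nlAns] at hy
    by_cases hpe : p = e.1
    · rw [if_pos hpe] at hy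
      exact ih p _ _ hs' hpt y hy
    · rw [if_neg hpe, List.mem_append] at hy
      rcases hy with hy | hy
      · by_cases h : (g && !go) = true
        · rw [if_pos h, List.mem_singleton] at hy; exact hy ▸ le_rfl
        · rw [if_neg h] at hy; simp at hy
      · exact le_trans hp1 (ih e.1 _ _ hs' hhead y hy)

theorem nlAns_mem (es : List (Char × String)) :
    ∀ (p : Char) (g go : Bool), es.Pairwise (fun a b => a.1 ≤ b.1) → (∀ e ∈ es, p ≤ e.1) →
      ∀ x : Char, (x ∈ nlAns p g go es ↔
        (if x = p then ((g = true ∨ nlGreyB p es) ∧ ¬(go = true ∨ nlGoodB p es))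
         else (nlGreyB x es ∧ ¬ nlGoodB x es))) := by
  induction es with
  | nil =>
    intro p g go _ _ x
    simp only [nlAns]
    by_cases hxp : x = p
    · subst hxp
      rw [if_pos rfl]
      cases g <;> cases go <;> simp [nlGreyB, nlGoodB]
    · rw [if_neg hxp]
      constructor
      · intro hy
        by_cases h : (g && !go) = true
        · rw [if_pos h, List.mem_singleton] at hy; exact absurd hy hxp
        · rw [if_neg h] at hy; simp at hy
      · rintro ⟨h, _⟩; simp [nlGreyB] at h
  | cons e t ih =>
    intro p g go hs hp x
    rw [List.pairwise_cons] at hs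
    obtain ⟨hhead, hs'⟩ := hs
    have hp1 : p ≤ e.1 := hp e List.mem_cons_self
    have hpt : ∀ e' ∈ t, p ≤ e'.1 := fun e' he' => hp e' (List.mem_cons_of_mem _ he')
    have hdec : (decide (e.2 = "grey") = true) ↔ e.2 = "grey" := by simp
    have hndec : ((!decide (e.2 = "grey")) = true) ↔ ¬ (e.2 = "grey") := by simp
    simp only [nlAns]
    by_cases hpe : p = e.1
    · -- the event continues the current group
      rw [if_pos hpe]
      rw [ih p _ _ hs' hpt x]
      by_cases hxp : x = p
      · rw [if_pos hxp, if_pos hxp, nlGreyB_cons, nlGoodB_cons, ← hpe]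
        subst hxp
        simp only [Bool.or_eq_true, hdec, hndec]
        tauto
      · rw [if_neg hxp, if_neg hxp, nlGreyB_cons, nlGoodB_cons, ← hpe]
        have hne : ¬ (p = x) := fun h => hxp h.symm
        tauto
    · -- a new group starts: p < e.1, and p never occurs in e :: t
      rw [if_neg hpe]
      have hplt : p < e.1 := lt_of_le_of_ne hp1 hpe
      have hnogrey : ¬ nlGreyB p (e :: t) := by
        rw [nlGreyB_cons]
        rintro (⟨h1, _⟩ | h)
        · exact absurd h1 (ne_of_gt hplt)
        · exact absurd (hhead _ h) (not_le.mpr hplt)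
      have hnogood : ¬ nlGoodB p (e :: t) := by
        rw [nlGoodB_cons]
        rintro (⟨h1, _⟩ | ⟨c, hc, _⟩)
        · exact absurd h1 (ne_of_gt hplt)
        · exact absurd (hhead _ hc) (not_le.mpr hplt)
      rw [List.mem_append, ih e.1 _ _ hs' hhead x]
      by_cases hxp : x = p
      · subst hxp
        rw [if_pos rfl]
        have hxe : ¬ (x = e.1) := ne_of_lt hplt
        rw [if_neg hxe]
        have hnomem : ¬ (nlGreyB x t ∧ ¬ nlGoodB x t) := by
          rintro ⟨h, _⟩
          exact absurd (hhead _ h) (not_le.mpr hplt)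
        constructor
        · rintro (hy | hy)
          · by_cases h : (g && !go) = true
            · rw [Bool.and_eq_true, Bool.not_eq_eq_eq_not, Bool.not_true] at h
              refine ⟨Or.inl h.1, ?_⟩
              rintro (hgo | hgood)
              · rw [h.2] at hgo; exact Bool.false_ne_true hgo
              · exact hnogood hgood
            · rw [if_neg h] at hy; simp at hy
          · exact absurd hy hnomem
        · rintro ⟨hg, hgo⟩
          have hg' : g = true := hg.resolve_right hnogrey
          have hgo' : go = false := by
            cases hgoe : go
            · rfl
            · exact absurd (Or.inl rfl) (hgoe ▸ hgo)
          left
          rw [hg', hgo']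
          simp
      · rw [if_neg hxp]
        have hfirst : x ∉ (if (g && !go) = true then [p] else []) := by
          by_cases h : (g && !go) = true
          · rw [if_pos h, List.mem_singleton]; exact hxp
          · rw [if_neg h]; exact List.not_mem_nil
        by_cases hxe : x = e.1
        · rw [if_pos hxe, nlGreyB_cons, nlGoodB_cons]
          subst hxe
          simp only [hdec, hndec]
          constructor
          · rintro (hy | hy)
            · exact absurd hy hfirst
            · tauto
          · intro hy
            right
            tauto
        · rw [if_neg hxe, nlGreyB_cons, nlGoodB_cons]
          have hne : ¬ (e.1 = x) := fun h => hxe h.symm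
          constructor
          · rintro (hy | hy)
            · exact absurd hy hfirst
            · tauto
          · intro hy
            right
            tauto

theorem nlAns_pairwise (es : List (Char × String)) :
    ∀ (p : Char) (g go : Bool), es.Pairwise (fun a b => a.1 ≤ b.1) → (∀ e ∈ es, p ≤ e.1) →
      (nlAns p g go es).Pairwise (· < ·) := by
  induction es with
  | nil =>
    intro p g go _ _
    simp only [nlAns]
    by_cases h : (g && !go) = true
    · rw [if_pos h]; exact List.pairwise_singleton _ _
    · rw [if_neg h]; exact List.Pairwise.nil
  | cons e t ih =>
    intro p g go hs hp
    rw [List.pairwise_cons] at hs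
    obtain ⟨hhead, hs'⟩ := hs
    have hp1 : p ≤ e.1 := hp e List.mem_cons_self
    have hpt : ∀ e' ∈ t, p ≤ e'.1 := fun e' he' => hp e' (List.mem_cons_of_mem _ he')
    simp only [nlAns]
    by_cases hpe : p = e.1
    · rw [if_pos hpe]
      exact ih p _ _ hs' hpt
    · rw [if_neg hpe]
      have hplt : p < e.1 := lt_of_le_of_ne hp1 hpe
      rw [List.pairwise_append]
      refine ⟨?_, ih e.1 _ _ hs' hhead, ?_⟩
      · by_cases h : (g && !go) = true
        · rw [if_pos h]; exact List.pairwise_singleton _ _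
        · rw [if_neg h]; exact List.Pairwise.nil
      · intro y hy z hz
        have hyp : y = p := by
          by_cases h : (g && !go) = true
          · rw [if_pos h, List.mem_singleton] at hy; exact hy
          · rw [if_neg h] at hy; simp at hy
        exact hyp ▸ lt_of_lt_of_le hplt (nlAns_le t e.1 _ _ hs' hhead z hz)

theorem nlAns0_mem (es : List (Char × String)) (hs : es.Pairwise (fun a b => a.1 ≤ b.1)) (x : Char) :
    x ∈ nlAns0 es ↔ (nlGreyB x es ∧ ¬ nlGoodB x es) := by
  cases es with
  | nil => simp [nlAns0, nlGreyB, nlGoodB]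
  | cons e t =>
    rw [List.pairwise_cons] at hs
    obtain ⟨hhead, hs'⟩ := hs
    simp only [nlAns0]
    rw [nlAns_mem t e.1 _ _ hs' hhead x, nlGreyB_cons, nlGoodB_cons]
    have hdec : (decide (e.2 = "grey") = true) ↔ e.2 = "grey" := by simp
    have hndec : ((!decide (e.2 = "grey")) = true) ↔ ¬ (e.2 = "grey") := by simp
    by_cases hxe : x = e.1
    · rw [if_pos hxe]
      subst hxe
      simp only [hdec, hndec]
      tauto
    · rw [if_neg hxe]
      have hne : ¬ (e.1 = x) := fun h => hxe h.symm
      tauto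

theorem nlAns0_pairwise (es : List (Char × String)) (hs : es.Pairwise (fun a b => a.1 ≤ b.1)) :
    (nlAns0 es).Pairwise (· < ·) := by
  cases es with
  | nil => exact List.Pairwise.nil
  | cons e t =>
    rw [List.pairwise_cons] at hs
    exact nlAns_pairwise t e.1 _ _ hs.2 hs.1

-- B's per-clue event list is the filtered, swapped version of A's.
def nlEvB (gc : String × List String) : List (Char × String) :=
  ((PySem.List.pyRange 0 (gc.2.length : Int) 1).filter (fun i =>
      decide (PySem.List.pyGetD gc.2 i "" = "grey" ∨ PySem.List.pyGetD gc.2 i "" = "green" ∨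
              PySem.List.pyGetD gc.2 i "" = "yellow"))).map
    (fun i => (PySem.List.pyGetD gc.1.toList i ' ', PySem.List.pyGetD gc.2 i ""))

theorem nlEvB_eq (gc : String × List String) :
    nlEvB gc = ((nlEv gc).filter (fun e =>
        decide (e.1 = "grey" ∨ e.1 = "green" ∨ e.1 = "yellow"))).map (fun e => (e.2, e.1)) := by
  unfold nlEvB nlEv
  rw [PySem.List.pyRange_zero_nat, List.filter_map, List.map_map, List.filter_map, List.map_map]
  simp [Function.comp_def]

theorem nlMemEvB (clues : List (String × List String)) (x : Char) (c : String) :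
    (x, c) ∈ clues.flatMap nlEvB ↔
      ((c, x) ∈ clues.flatMap nlEv ∧ (c = "grey" ∨ c = "green" ∨ c = "yellow")) := by
  simp only [List.mem_flatMap]
  constructor
  · rintro ⟨gc, hgc, hm⟩
    rw [nlEvB_eq, List.mem_map] at hm
    obtain ⟨e, he, heq⟩ := hm
    rw [List.mem_filter] at he
    have h1 : e.2 = x := congrArg Prod.fst heq
    have h2 : e.1 = c := congrArg Prod.snd heq
    have hrel := of_decide_eq_true he.2
    refine ⟨⟨gc, hgc, ?_⟩, h2 ▸ hrel⟩
    have : e = (c, x) := Prod.ext h2 h1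
    exact this ▸ he.1
  · rintro ⟨⟨gc, hgc, hm⟩, hrel⟩
    refine ⟨gc, hgc, ?_⟩
    rw [nlEvB_eq, List.mem_map]
    exact ⟨(c, x), List.mem_filter.mpr ⟨hm, decide_eq_true hrel⟩, rfl⟩

theorem nlGreyB_iff (clues : List (String × List String)) (x : Char) :
    nlGreyB x (clues.flatMap nlEvB) ↔ nlGrey x (clues.flatMap nlEv) := by
  unfold nlGreyB nlGrey
  rw [nlMemEvB]
  simp

theorem nlGoodB_iff (clues : List (String × List String)) (x : Char) :
    nlGoodB x (clues.flatMap nlEvB) ↔ nlGood x (clues.flatMap nlEv) := by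
  unfold nlGoodB nlGood
  constructor
  · rintro ⟨c, hc, hne⟩
    rw [nlMemEvB] at hc
    refine ⟨(c, x), hc.1, ?_, rfl⟩
    rcases hc.2 with h | h
    · exact absurd h hne
    · exact h
  · rintro ⟨e, he, hgy, hx⟩
    refine ⟨e.1, ?_, ?_⟩
    · rw [nlMemEvB]
      have : (e.1, x) = e := Prod.ext rfl hx.symm
      exact ⟨this ▸ he, Or.inr hgy⟩
    · rcases hgy with h | h <;> simp [h]

-- ===== VERDICT (by name: the statement is the Claim_ definition above) =====
theorem no_letters_spec : Claim_equal_no_letters := by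
  intro clues _ _
  unfold Spec_no_letters
  simp only [no_letters, no_letters_alt]
  rw [nlFoldA]
  have hEvB : clues.flatMap (fun gc =>
      ((PySem.List.pyRange 0 (gc.2.length : Int) 1).filter (fun i =>
          decide (PySem.List.pyGetD gc.2 i "" = "grey" ∨ PySem.List.pyGetD gc.2 i "" = "green" ∨
                  PySem.List.pyGetD gc.2 i "" = "yellow"))).map
        (fun i => (PySem.List.pyGetD gc.1.toList i ' ', PySem.List.pyGetD gc.2 i ""))) =
      clues.flatMap nlEvB := rfl
  rw [hEvB, nlFoldB0]
  obtain ⟨hn1, hn2, hinv⟩ := nlAInv (clues.flatMap nlEv)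
  set sA := (clues.flatMap nlEv).foldl nlStepA (PySem.Set.empty, PySem.Set.empty) with hsA
  set sevs := PySem.List.sorted (clues.flatMap nlEvB) (fun e => e.1) false with hsevs
  have hsorted : sevs.Pairwise (fun a b => a.1 ≤ b.1) := PySem.List.sorted_pairwise _ _
  have hmemev : ∀ e, e ∈ sevs ↔ e ∈ clues.flatMap nlEvB := fun e =>
    PySem.List.mem_sorted _ _ _ _
  have hR_pairwise : (nlAns0 sevs).Pairwise (· < ·) := nlAns0_pairwise sevs hsorted
  have hR_mem : ∀ x, x ∈ nlAns0 sevs ↔ (x ∈ sA.1 ∧ x ∉ sA.2) := by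
    intro x
    rw [nlAns0_mem sevs hsorted x, (hinv x).2]
    constructor
    · rintro ⟨hg, hgo⟩
      refine ⟨(nlGreyB_iff clues x).1 ?_, fun hgood => hgo ?_⟩
      · unfold nlGreyB; rw [← hmemev]; exact hg
      · obtain ⟨c, hc, hcne⟩ := (nlGoodB_iff clues x).2 hgood
        exact ⟨c, (hmemev _).2 hc, hcne⟩
    · rintro ⟨hg, hgo⟩
      refine ⟨?_, fun hgood => hgo ?_⟩
      · have := (nlGreyB_iff clues x).2 hg
        unfold nlGreyB at this ⊢; rw [hmemev]; exact this
      · obtain ⟨c, hc, hcne⟩ := hgood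
        exact (nlGoodB_iff clues x).1 ⟨c, (hmemev _).1 hc, hcne⟩
  have hperm : (nlAns0 sevs).Perm (PySem.Set.diff sA.1 sA.2) := by
    rw [List.perm_ext_iff_of_nodup hR_pairwise.nodup (PySem.Set.nodup_diff _ _ hn1)]
    intro x
    rw [hR_mem x, PySem.Set.mem_diff]
  rw [PySem.List.sorted_eq_of_perm_of_pairwise_lt _ _ _ hperm hR_pairwise]
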